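-- pv_equiv track=rewrite | github.com/PTheyssen/aoc_2024 | day4/solution.py | is_valid_X_MAS
-- ===== SOURCE A (Python) =====
-- def is_valid_X_MAS(words, positions) -> bool:
--     """
--     M.S
--     .A.
--     M.S
--     ---
--     M.M
--     .A.
--     S.S
--     ---
--     S.M
--     .A.
--     S.M
--     ---
--     S.S
--     .A.
--     M.M
--
--     check all A's
--     """
--     ## think about mathematical group / symmetry of this
--     valid_sequences = [
--         ["M", "S", "S", "M"],
--         ["M", "M", "S", "S"],
--         ["S", "M", "M", "S"],
--         ["S", "S", "M", "M"],
--     ]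
--     curr_sequence = []
--     for (i, j) in positions:
--         if 0 > i or i >= len(words):
--             return False
--         if 0 > j or j >= len(words):
--             return False
--         curr_sequence.append(words[i][j])
--     if curr_sequence in valid_sequences:
--         return True
--     return False
-- ===== SOURCE B (Python) =====
-- def is_valid_X_MAS(words, positions) -> bool:
--     n = len(words)
--     if any(not (0 <= i < n and 0 <= j < n) for (i, j) in positions):
--         return False
--     seq = [words[i][j] for (i, j) in positions]
--     return (len(seq) == 4
--             and all(ch in ("M", "S") for ch in seq)
--             and seq[0] != seq[2] and seq[1] != seq[3])
-- ===== Notes on version B (the rewrite author's own statement) =====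
-- stated objective: simpler
-- what changed: B replaces the incremental loop-with-early-return plus four-row lookup table by a single bounds pre-check with any(), a comprehension building the sequence, and a computed symmetry predicate (length 4, letters in {M,S}, opposite corners differ) instead of the enumerated table.
import Mathlib
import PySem

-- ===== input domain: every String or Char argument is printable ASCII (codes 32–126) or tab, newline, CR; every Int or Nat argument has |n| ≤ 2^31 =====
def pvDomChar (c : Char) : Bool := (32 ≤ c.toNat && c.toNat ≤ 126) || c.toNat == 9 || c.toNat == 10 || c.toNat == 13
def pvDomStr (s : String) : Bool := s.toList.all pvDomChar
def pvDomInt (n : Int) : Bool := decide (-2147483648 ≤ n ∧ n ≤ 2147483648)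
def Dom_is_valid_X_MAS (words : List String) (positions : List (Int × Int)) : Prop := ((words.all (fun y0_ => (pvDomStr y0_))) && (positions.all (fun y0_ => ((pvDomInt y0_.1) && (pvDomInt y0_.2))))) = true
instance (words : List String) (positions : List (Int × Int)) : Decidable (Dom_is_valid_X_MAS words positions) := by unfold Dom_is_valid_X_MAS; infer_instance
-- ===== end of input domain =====

-- B replaces A's incremental loop-with-early-return plus four-row lookup table by a bounds
-- pre-check, a comprehension, and a computed symmetry predicate: simpler.

-- ===== PORT A =====
-- the table of the four valid corner sequences (each Python 1-char string ported as a Char)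
def pvValidSeqs : List (List Char) :=
  [['M','S','S','M'], ['M','M','S','S'], ['S','M','M','S'], ['S','S','M','M']]

-- the loop of A: walk positions, bounds-check i and j against len(words), append words[i][j];
-- the 'none' branch is Python's IndexError on a row shorter than j+1 (excluded by Pre_).
def pvGoA (words : List String) : List (Int × Int) → List Char → Bool
  | [], acc => pvValidSeqs.contains acc
  | (i, j) :: rest, acc =>
    if 0 > i || i ≥ (words.length : Int) then false
    else if 0 > j || j ≥ (words.length : Int) then false
    else
      match (PySem.List.pyGet? words i).bind (fun w => PySem.Str.pyGet? w j) with
      | none => false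
      | some c => pvGoA words rest (acc ++ [c])

def is_valid_X_MAS (words : List String) (positions : List (Int × Int)) : Bool :=
  pvGoA words positions []

-- ===== PORT B =====
-- 0 <= i < n and 0 <= j < n
def pvInB (words : List String) (p : Int × Int) : Bool :=
  0 ≤ p.1 && p.1 < (words.length : Int) && 0 ≤ p.2 && p.2 < (words.length : Int)

-- words[i][j] (total; the default is only reachable outside Pre_)
def pvAccess (words : List String) (p : Int × Int) : Char :=
  ((PySem.List.pyGet? words p.1).bind (fun w => PySem.Str.pyGet? w p.2)).getD ' '

def is_valid_X_MAS_alt (words : List String) (positions : List (Int × Int)) : Bool :=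
  if positions.any (fun p => !(pvInB words p)) then false
  else
    let seq := positions.map (pvAccess words)
    seq.length == 4
      && seq.all (fun ch => ch == 'M' || ch == 'S')
      && !(PySem.List.pyGetD seq 0 ' ' == PySem.List.pyGetD seq 2 ' ')
      && !(PySem.List.pyGetD seq 1 ' ' == PySem.List.pyGetD seq 3 ' ')

-- ===== PRECONDITION & SPEC =====
-- Pre_ excludes exactly the inputs where A raises IndexError: some position whose whole prefix
-- (itself included) passes the i,j < len(words) bounds checks but whose row words[i] is shorter than j+1.
def Pre_is_valid_X_MAS (words : List String) (positions : List (Int × Int)) : Prop :=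
  ∀ k : Nat, (hk : k < positions.length) →
    (∀ m : Nat, (hm : m < positions.length) → m ≤ k → pvInB words (positions[m]) = true) →
    (positions[k]).2 < ((words.getD ((positions[k]).1.toNat) "").toList.length : Int)
instance (words : List String) (positions : List (Int × Int)) : Decidable (Pre_is_valid_X_MAS words positions) := by
  unfold Pre_is_valid_X_MAS; infer_instance

def pvWitness_is_valid_X_MAS : List String × (List (Int × Int)) :=
  (["MXS", "XAX", "MXS"], [(0,0), (0,2), (2,2), (2,0)])

def Spec_is_valid_X_MAS (words : List String) (positions : List (Int × Int)) (out : Bool) : Prop := out = is_valid_X_MAS_alt words positions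
instance (words : List String) (positions : List (Int × Int)) (out : Bool) : Decidable (Spec_is_valid_X_MAS words positions out) := by unfold Spec_is_valid_X_MAS; infer_instance

-- ===== CLAIM (what is proved, stated in full; the proofs are below) =====
def Claim_equal_is_valid_X_MAS : Prop := ∀ (words : List String) (positions : List (Int × Int)), Dom_is_valid_X_MAS words positions → Pre_is_valid_X_MAS words positions → Spec_is_valid_X_MAS words positions (is_valid_X_MAS words positions)

-- ===== LEMMAS AND PROOFS =====

-- recursive form of the precondition, easier to induct on
def pvPreL (words : List String) : List (Int × Int) → Prop
  | [] => True
  | p :: t => pvInB words p = true →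
      (p.2 < ((words.getD (p.1.toNat) "").toList.length : Int) ∧ pvPreL words t)

lemma pvPre_iff (words : List String) (positions : List (Int × Int)) :
    Pre_is_valid_X_MAS words positions ↔ pvPreL words positions := by
  induction positions with
  | nil => simp [Pre_is_valid_X_MAS, pvPreL]
  | cons p t ih =>
    constructor
    · intro h hin
      refine ⟨?_, ?_⟩
      · have := h 0 (by simp) (by
          intro m hm hm0
          have : m = 0 := Nat.le_zero.mp hm0
          subst this
          simpa using hin)
        simpa using this
      · refine ih.1 ?_
        intro k hk hpre
        have := h (k+1) (by simpa using Nat.succ_lt_succ hk) (by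
          intro m hm hmk
          cases m with
          | zero => simpa using hin
          | succ m' =>
            have hm' : m' < t.length := by simpa using Nat.lt_of_succ_lt_succ hm
            simpa using hpre m' hm' (Nat.le_of_succ_le_succ hmk))
        simpa using this
    · intro h k hk hpre
      cases k with
      | zero =>
        have hin : pvInB words p = true := by simpa using hpre 0 hk (Nat.le_refl 0)
        simpa using (h hin).1
      | succ k' =>
        have hin : pvInB words p = true := by simpa using hpre 0 (by omega) (Nat.zero_le _)
        have hk' : k' < t.length := by simpa using Nat.lt_of_succ_lt_succ hk
        have := (ih.2 (h hin).2) k' hk' (by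
          intro m hm hmk
          simpa using hpre (m+1) (by simpa using Nat.succ_lt_succ hm) (Nat.succ_le_succ hmk))
        simpa using this

lemma trichC (c : Char) : c = 'M' ∨ c = 'S' ∨ (c ≠ 'M' ∧ c ≠ 'S') := by tauto

-- B's final predicate coincides with membership in A's table
lemma pvTable_iff (seq : List Char) :
    pvValidSeqs.contains seq =
      (seq.length == 4
        && seq.all (fun ch => ch == 'M' || ch == 'S')
        && !(PySem.List.pyGetD seq 0 ' ' == PySem.List.pyGetD seq 2 ' ')
        && !(PySem.List.pyGetD seq 1 ' ' == PySem.List.pyGetD seq 3 ' ')) := by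
  match seq with
  | [] => decide
  | [a] => simp [pvValidSeqs]
  | [a,b] => simp [pvValidSeqs]
  | [a,b,c] => simp [pvValidSeqs]
  | a :: b :: c :: d :: e :: t => simp [pvValidSeqs]
  | [a,b,c,d] =>
    simp only [PySem.List.pyGetD_ofNat', List.getD, List.getElem?_cons_zero,
      List.getElem?_cons_succ, Option.getD_some]
    rcases trichC a with ha | ha | ⟨ha1, ha2⟩ <;>
    rcases trichC b with hb | hb | ⟨hb1, hb2⟩ <;>
    rcases trichC c with hc | hc | ⟨hc1, hc2⟩ <;>
    rcases trichC d with hd | hd | ⟨hd1, hd2⟩ <;>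
      simp_all [pvValidSeqs]

-- A's loop, restructured into B's shape: bounds any-check, then the table on the mapped accesses
lemma pvGoA_eq (words : List String) :
    ∀ (ps : List (Int × Int)) (acc : List Char), pvPreL words ps →
      pvGoA words ps acc =
        (if ps.any (fun p => !(pvInB words p)) then false
         else pvValidSeqs.contains (acc ++ ps.map (pvAccess words))) := by
  intro ps
  induction ps with
  | nil => intro acc _; simp [pvGoA]
  | cons p t ih =>
    intro acc hp
    obtain ⟨i, j⟩ := p
    by_cases hin : pvInB words (i, j) = true
    · have hb : ¬ (0 ≤ i ∧ i < (words.length : Int) ∧ 0 ≤ j ∧ j < (words.length : Int)) → False := by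
        intro hc; apply hc; simpa [pvInB, and_assoc] using hin
      have hbounds : 0 ≤ i ∧ i < (words.length : Int) ∧ 0 ≤ j ∧ j < (words.length : Int) := by
        by_contra hc; exact hb hc
      obtain ⟨hi0, hi1, hj0, hj1⟩ := hbounds
      obtain ⟨hok, hpt⟩ : _ ∧ pvPreL words t := hp hin
      have hrow : PySem.List.pyGet? words i = some (words[i.toNat]'(by omega)) :=
        PySem.List.pyGet?_eq_some_getElem (h0 := hi0) (h1 := hi1)
      have hlenrow : j < ((words[i.toNat]'(by omega)).toList.length : Int) := by
        have : words.getD i.toNat "" = words[i.toNat]'(by omega) :=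
          List.getD_eq_getElem words "" (by omega)
        rw [this] at hok; exact hok
      have hchar : PySem.Str.pyGet? (words[i.toNat]'(by omega)) j =
          some ((words[i.toNat]'(by omega)).toList[j.toNat]'(by omega)) := by
        simp only [PySem.Str.pyGet?_eq, PySem.Chars.pyGet?_eq_listPyGet?]
        exact PySem.List.pyGet?_eq_some_getElem (h0 := hj0) (h1 := by simpa using hlenrow)
      have hscrut : (PySem.List.pyGet? words i).bind (fun w => PySem.Str.pyGet? w j) =
          some ((words[i.toNat]'(by omega)).toList[j.toNat]'(by omega)) := by
        rw [hrow]; simpa using hchar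
      have hacc : pvAccess words (i, j) = (words[i.toNat]'(by omega)).toList[j.toNat]'(by omega) := by
        simp only [pvAccess, hscrut, Option.getD_some]
      have hA : pvGoA words ((i,j) :: t) acc =
          pvGoA words t (acc ++ [pvAccess words (i,j)]) := by
        simp only [pvGoA]
        rw [if_neg (by simp; omega), if_neg (by simp; omega), hscrut, hacc]
      rw [hA, ih _ hpt]
      simp only [List.any_cons, hin, Bool.not_true, Bool.false_or, List.map_cons]
      simp only [List.append_assoc, List.singleton_append]
    · -- out of bounds: A returns false at one of the two checks
      have hfail : (0 > i ∨ i ≥ (words.length : Int)) ∨ (0 > j ∨ j ≥ (words.length : Int)) := by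
        by_contra hc
        push Not at hc
        exact hin (by simp [pvInB]; omega)
      have hA : pvGoA words ((i,j) :: t) acc = false := by
        simp only [pvGoA]
        rcases hfail with h | h
        · rw [if_pos (by simpa using h)]
        · by_cases h1 : (0 > i || i ≥ (words.length : Int)) = true
          · rw [if_pos h1]
          · rw [if_neg h1, if_pos (by simpa using h)]
      rw [hA]
      rw [if_pos (by simp [List.any_cons, hin])]

-- ===== VERDICT (by name: the statement is the Claim_ definition above) =====
theorem is_valid_X_MAS_spec : Claim_equal_is_valid_X_MAS := by
  intro words positions _ hpre
  unfold Spec_is_valid_X_MAS is_valid_X_MAS is_valid_X_MAS_alt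
  rw [pvGoA_eq words positions [] ((pvPre_iff words positions).1 hpre)]
  simp only [List.nil_append, pvTable_iff]
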